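-- pv_equiv track=rewrite | github.com/Pratap123singh/python_assignment | string/q11.py | count_sentence
-- ===== SOURCE A (Python) =====
-- def count_sentence(s: str):
--     count_normal=0
--     count_interrogative=0
--     count_exclamatory=0
--     for idx in range(0,len(s),1):
--         if s[idx] in ["."]:
--             count_normal+=1
--         elif s[idx] in ["!"]:
--             count_interrogative+=1
--         elif s[idx] in ["?"]:
--             count_exclamatory+=1
--     return (count_normal, count_interrogative, count_exclamatory)
-- ===== SOURCE B (Python) =====
-- def count_sentence(s: str):
--     freq = {}
--     for ch in s:
--         freq[ch] = freq.get(ch, 0) + 1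
--     return (freq.get(".", 0), freq.get("!", 0), freq.get("?", 0))
-- ===== Notes on version B (the rewrite author's own statement) =====
-- stated objective: alternative
-- what changed: Replaces A's per-index loop (range + s[idx] with if/elif branching into three accumulators) by building one frequency table of all characters and then reading the three punctuation keys from it.
import Mathlib
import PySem

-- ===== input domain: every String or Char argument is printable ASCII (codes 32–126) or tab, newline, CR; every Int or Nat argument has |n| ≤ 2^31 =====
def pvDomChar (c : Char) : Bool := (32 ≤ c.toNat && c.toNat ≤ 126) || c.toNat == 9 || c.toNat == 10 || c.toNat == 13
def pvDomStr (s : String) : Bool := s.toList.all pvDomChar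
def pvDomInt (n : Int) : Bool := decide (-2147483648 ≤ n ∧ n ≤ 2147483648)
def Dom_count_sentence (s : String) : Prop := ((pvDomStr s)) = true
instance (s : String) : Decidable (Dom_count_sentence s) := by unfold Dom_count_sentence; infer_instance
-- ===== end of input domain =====

-- B builds one frequency table of all characters, then reads the three keys; same O(n) cost, different structure.

-- ===== PORT A =====
def count_sentence (s : String) : Int × Int × Int :=
  (PySem.List.pyRange 0 (PySem.Str.len s) 1).foldl
    (fun (acc : Int × Int × Int) idx =>
      match PySem.Str.pyGet? s idx with
      | some c =>
          if c ∈ ['.'] then (acc.1 + 1, acc.2.1, acc.2.2)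
          else if c ∈ ['!'] then (acc.1, acc.2.1 + 1, acc.2.2)
          else if c ∈ ['?'] then (acc.1, acc.2.1, acc.2.2 + 1)
          else acc
      | none => acc)  -- unreachable: idx always in range
    (0, 0, 0)

-- ===== PORT B =====
def count_sentence_alt (s : String) : Int × Int × Int :=
  let freq : PySem.Dict Char Int :=
    s.toList.foldl (fun d ch => d.insert ch (d.getD ch 0 + 1)) PySem.Dict.empty
  (freq.getD '.' 0, freq.getD '!' 0, freq.getD '?' 0)

-- ===== PRECONDITION & SPEC =====
def Spec_count_sentence (s : String) (out : Int × Int × Int) : Prop := out = count_sentence_alt s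
instance (s : String) (out : Int × Int × Int) : Decidable (Spec_count_sentence s out) := by unfold Spec_count_sentence; infer_instance

-- ===== CLAIM (what is proved, stated in full; the proofs are below) =====
def Claim_equal_count_sentence : Prop := ∀ (s : String), Dom_count_sentence s → Spec_count_sentence s (count_sentence s)

-- ===== LEMMAS AND PROOFS =====

-- A's triple-accumulator loop computes the three character counts.
theorem pv_foldA (cs : List Char) (a b c : Int) :
    cs.foldl
      (fun (acc : Int × Int × Int) ch =>
        if ch ∈ ['.'] then (acc.1 + 1, acc.2.1, acc.2.2)
        else if ch ∈ ['!'] then (acc.1, acc.2.1 + 1, acc.2.2)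
        else if ch ∈ ['?'] then (acc.1, acc.2.1, acc.2.2 + 1)
        else acc) (a, b, c)
    = (a + cs.count '.', b + cs.count '!', c + cs.count '?') := by
  induction cs generalizing a b c with
  | nil => simp
  | cons x xs ih =>
      simp only [List.foldl_cons, List.mem_singleton, List.count_cons] at ih ⊢
      by_cases h1 : x = '.'
      · rw [if_pos h1, ih]; simp [h1]; omega
      · by_cases h2 : x = '!'
        · rw [if_neg h1, if_pos h2, ih]; simp [h2]; omega
        · by_cases h3 : x = '?'
          · rw [if_neg h1, if_neg h2, if_pos h3, ih]; simp [h3]; omega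
          · rw [if_neg h1, if_neg h2, if_neg h3, ih]; simp [h1, h2, h3]

-- A's index loop over the string is a fold over its characters.
theorem pv_A_eq (s : String) :
    count_sentence s
      = ((s.toList.count '.' : Int), (s.toList.count '!' : Int), (s.toList.count '?' : Int)) := by
  unfold count_sentence
  have h : (PySem.List.pyRange 0 (PySem.Str.len s) 1).foldl
      (fun (acc : Int × Int × Int) idx =>
        match PySem.Str.pyGet? s idx with
        | some c =>
            if c ∈ ['.'] then (acc.1 + 1, acc.2.1, acc.2.2)
            else if c ∈ ['!'] then (acc.1, acc.2.1 + 1, acc.2.2)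
            else if c ∈ ['?'] then (acc.1, acc.2.1, acc.2.2 + 1)
            else acc
        | none => acc) ((0 : Int), (0 : Int), (0 : Int))
      = (PySem.List.pyRange 0 (PySem.Str.len s) 1).foldl
      (fun (acc : Int × Int × Int) idx =>
        (fun (acc : Int × Int × Int) c =>
            if c ∈ ['.'] then (acc.1 + 1, acc.2.1, acc.2.2)
            else if c ∈ ['!'] then (acc.1, acc.2.1 + 1, acc.2.2)
            else if c ∈ ['?'] then (acc.1, acc.2.1, acc.2.2 + 1)
            else acc) acc (PySem.List.pyGetD s.toList idx ' ')) ((0 : Int), (0 : Int), (0 : Int)) := by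
    apply PySem.List.foldl_congr_mem
    intro acc x hx
    rw [PySem.List.mem_pyRange_one] at hx
    have hlen : x < (s.toList.length : Int) := by
      have hl : PySem.Str.len s = (s.toList.length : Int) := by simp
      rw [hl] at hx; exact hx.2
    have hx0 := hx.1
    have hget : PySem.Str.pyGet? s x = some (PySem.List.pyGetD s.toList x ' ') := by
      have hlt : x < (s.length : Int) := by simpa using hlen
      simp [PySem.List.pyGetD, PySem.List.pyGet?, PySem.List.pyIdx?, hx0, hlt]
    rw [hget]
  rw [h]
  have hlen : PySem.Str.len s = (s.toList.length : Int) := by simp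
  rw [hlen]
  rw [PySem.List.foldl_pyRange_zero_pyGetD' s.toList ' '
      (fun (acc : Int × Int × Int) c =>
          if c ∈ ['.'] then (acc.1 + 1, acc.2.1, acc.2.2)
          else if c ∈ ['!'] then (acc.1, acc.2.1 + 1, acc.2.2)
          else if c ∈ ['?'] then (acc.1, acc.2.1, acc.2.2 + 1)
          else acc) ((0 : Int), (0 : Int), (0 : Int))]
  rw [pv_foldA]
  simp

-- B's frequency table reads back the character counts.
theorem pv_B_eq (s : String) :
    count_sentence_alt s
      = ((s.toList.count '.' : Int), (s.toList.count '!' : Int), (s.toList.count '?' : Int)) := by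
  unfold count_sentence_alt
  simp [PySem.Dict.getD_foldl_insert_add_one]

-- ===== VERDICT (by name: the statement is the Claim_ definition above) =====
theorem count_sentence_spec : Claim_equal_count_sentence := by
  intro s _
  unfold Spec_count_sentence
  rw [pv_A_eq, pv_B_eq]
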